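-- pv_equiv track=rewrite | github.com/ederror/algorithm-study | Programmers/최고의 집합.py | solution
-- ===== SOURCE A (Python) =====
-- def solution(n, s):
--     if s < n: # Exception
--         return [-1]
--
--     remainder = s % n
--     answer = [s//n] * n
--
--     for i in range(n-1, n-remainder-1, -1):
--         answer[i] += 1
--
--     return answer
-- ===== SOURCE B (Python) =====
-- def solution(n, s):
--     if s < n:  # Exception
--         return [-1]
--     answer = []
--     k, rem = n, s
--     while k > 0:
--         c = -((-rem) // k)   # ceiling division: the largest element among k items summing to rem
--         answer.append(c)
--         rem -= c
--         k -= 1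
--     answer.reverse()
--     return answer
-- ===== Notes on version B (the rewrite author's own statement) =====
-- stated objective: alternative
-- what changed: Replaces the fill-with-s//n-then-increment-the-tail construction with a greedy loop that repeatedly extracts the largest element as a fresh ceiling division ceil(rem/k) of the running remainder, appends it, and reverses at the end.
import Mathlib
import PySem

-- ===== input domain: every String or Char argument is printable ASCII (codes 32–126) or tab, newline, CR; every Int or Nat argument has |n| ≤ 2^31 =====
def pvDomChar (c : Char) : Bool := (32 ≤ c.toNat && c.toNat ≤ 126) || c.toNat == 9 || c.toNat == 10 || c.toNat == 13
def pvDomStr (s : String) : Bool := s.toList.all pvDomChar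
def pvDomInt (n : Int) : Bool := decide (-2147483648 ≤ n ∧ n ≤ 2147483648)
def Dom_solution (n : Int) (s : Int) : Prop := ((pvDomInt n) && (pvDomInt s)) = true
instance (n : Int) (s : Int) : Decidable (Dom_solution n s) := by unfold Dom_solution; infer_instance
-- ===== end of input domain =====

-- B replaces A's fill-then-increment construction with a greedy loop: it repeatedly takes
-- ceil(rem/k) as the next (largest) element, subtracts it, and reverses (objective: alternative).

-- ===== PORT A =====
-- answer[i] += 1 on the loop indices: every index produced by the countdown range is
-- nonnegative and in bounds whenever n > 0, so List.modify at i.toNat is exact here.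
def solution (n : Int) (s : Int) : List Int :=
  if s < n then [-1]
  else
    let remainder := PySem.Int.mod s n
    let answer := PySem.List.pyRepeat [PySem.Int.floordiv s n] n
    (PySem.List.pyRange (n - 1) (n - remainder - 1) (-1)).foldl
      (fun acc i => acc.modify i.toNat (· + 1)) answer

-- ===== PORT B =====
-- the while loop of Source B: fuel = k.toNat (k > 0 iff fuel > 0, k decreases by 1 each pass)
def solAltLoop : Nat → Int → Int → List Int → List Int
  | 0, _, _, acc => acc
  | m + 1, k, rem, acc =>
      let c := -(PySem.Int.floordiv (-rem) k)
      solAltLoop m (k - 1) (rem - c) (acc ++ [c])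

def solution_alt (n : Int) (s : Int) : List Int :=
  if s < n then [-1]
  else (solAltLoop n.toNat n s []).reverse

-- ===== PRECONDITION & SPEC =====
-- Pre_ excludes exactly n = 0 with s ≥ n, where A raises ZeroDivisionError (s % n).
def Pre_solution (n : Int) (s : Int) : Prop := n ≠ 0 ∨ s < n
instance (n : Int) (s : Int) : Decidable (Pre_solution n s) := by unfold Pre_solution; infer_instance
def pvWitness_solution : Int × Int := (3, 13)

def Spec_solution (n : Int) (s : Int) (out : List Int) : Prop := out = solution_alt n s
instance (n : Int) (s : Int) (out : List Int) : Decidable (Spec_solution n s out) := by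
  unfold Spec_solution; infer_instance

-- ===== CLAIM (what is proved, stated in full; the proofs are below) =====
def Claim_equal_solution : Prop :=
  ∀ (n : Int) (s : Int), Dom_solution n s → Pre_solution n s → Spec_solution n s (solution n s)

-- ===== LEMMAS AND PROOFS =====

-- the fold's step preserves the empty list (n < 0 case of A: answer is [])
lemma foldl_modify_nil (l : List Int) :
    l.foldl (fun (acc : List Int) (i : Int) => acc.modify i.toNat (· + 1)) [] = [] := by
  induction l with
  | nil => rfl
  | cons x xs ih =>
    rw [List.foldl_cons]
    have hnil : (([] : List Int).modify x.toNat (· + 1)) = [] := by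
      cases x.toNat <;> simp [List.modify]
    rw [hnil]; exact ih

lemma modify_replicate_append (q : Int) (len : Nat) (tail : List Int) :
    (List.replicate (len + 1) q ++ tail).modify len (· + 1)
      = List.replicate len q ++ (q + 1) :: tail := by
  induction len with
  | zero => simp [List.modify]
  | succ k ih => simpa [List.replicate_succ, List.modify] using ih

-- A's loop invariant: folding the countdown range over replicate
lemma loopA (q : Int) :
    ∀ (r len : Nat) (tail : List Int), r ≤ len →
    (PySem.List.pyRange ((len : Int) - 1) ((len : Int) - (r : Int) - 1) (-1)).foldl
        (fun (acc : List Int) (i : Int) => acc.modify i.toNat (· + 1))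
        (List.replicate len q ++ tail)
      = List.replicate (len - r) q ++ List.replicate r (q + 1) ++ tail := by
  intro r
  induction r with
  | zero =>
    intro len tail _
    rw [PySem.List.pyRange_neg_one_eq_nil (by omega)]
    simp
  | succ k ih =>
    intro len tail hle
    obtain ⟨m, rfl⟩ : ∃ m, len = m + 1 := ⟨len - 1, by omega⟩
    rw [PySem.List.pyRange_neg_one_cons (by push_cast; omega)]
    rw [List.foldl_cons]
    have hstep : (List.replicate (m + 1) q ++ tail).modify ((↑(m + 1) : Int) - 1).toNat (· + 1)
        = List.replicate m q ++ (q + 1) :: tail := by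
      push_cast
      rw [show ((m : Int) + 1 - 1).toNat = m by omega]
      exact modify_replicate_append q m tail
    rw [hstep]
    have := ih m ((q + 1) :: tail) (by omega)
    rw [show ((↑(m + 1) : Int) - 1 - 1) = (m : Int) - 1 by push_cast; ring,
        show ((↑(m + 1) : Int) - (↑(k + 1) : Int) - 1) = (m : Int) - (k : Int) - 1 by push_cast; ring]
    rw [this]
    rw [show m + 1 - (k + 1) = m - k by omega]
    simp [List.replicate_succ']

-- B's loop invariant: with rem = q*m + r (0 ≤ r < m), the greedy loop emits
-- r copies of q+1 (largest elements first) and then m-r copies of q.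
lemma loopB (q : Int) : ∀ (m : Nat) (r : Int) (acc : List Int), 0 ≤ r → r < (m : Int) →
    solAltLoop m (m : Int) (q * m + r) acc
      = acc ++ List.replicate r.toNat (q + 1) ++ List.replicate (m - r.toNat) q := by
  intro m
  induction m with
  | zero => intro r acc h0 h1; omega
  | succ t ih =>
    intro r acc h0 h1
    rw [solAltLoop]
    by_cases hr : r = 0
    · subst hr
      have hc : -(PySem.Int.floordiv (-(q * ((t : Int) + 1) + 0)) ((t : Int) + 1)) = q := by
        rw [PySem.Int.neg_floordiv_neg_eq_iff_of_pos (by omega)]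
        constructor <;> nlinarith
      push_cast
      rw [hc]
      rcases Nat.eq_zero_or_pos t with ht | ht
      · subst ht; simp [solAltLoop]
      · have := ih 0 (acc ++ [q]) le_rfl (by exact_mod_cast ht)
        rw [show ((t : Int) + 1 - 1) = (t : Int) by ring,
            show (q * ((t : Int) + 1) + 0 - q) = q * (t : Int) + 0 by ring]
        rw [this]
        simp only [Int.toNat_zero, List.replicate_zero, List.append_nil, Nat.sub_zero,
          List.append_assoc]
        simp [List.replicate_succ]
    · have hr1 : 1 ≤ r := by omega
      have hc : -(PySem.Int.floordiv (-(q * ((t : Int) + 1) + r)) ((t : Int) + 1)) = q + 1 := by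
        rw [PySem.Int.neg_floordiv_neg_eq_iff_of_pos (by omega)]
        push_cast at h1 ⊢
        constructor <;> nlinarith
      push_cast
      rw [hc]
      have ht : 1 ≤ t := by push_cast at h1; omega
      have := ih (r - 1) (acc ++ [q + 1]) (by omega) (by push_cast at h1 ⊢; omega)
      rw [show ((t : Int) + 1 - 1) = (t : Int) by ring,
          show (q * ((t : Int) + 1) + r - (q + 1)) = q * (t : Int) + (r - 1) by ring]
      rw [this]
      have hrt : r.toNat = (r - 1).toNat + 1 := by omega
      rw [hrt, show t + 1 - ((r - 1).toNat + 1) = t - (r - 1).toNat by omega]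
      simp [List.replicate_succ, List.append_assoc]

theorem solution_spec : Claim_equal_solution := by
  intro n s _ hpre
  unfold Spec_solution solution solution_alt
  by_cases hs : s < n
  · simp [hs]
  · simp only [hs, if_false]
    have hn0 : n ≠ 0 := by
      rcases hpre with h | h
      · exact h
      · exact absurd h hs
    set q := PySem.Int.floordiv s n with hq
    set r := PySem.Int.mod s n with hr
    rcases lt_or_gt_of_ne hn0 with hneg | hpos
    · -- n < 0 : both sides are []
      rw [show PySem.List.pyRepeat [q] n = [] by
            simp [PySem.List.pyRepeat_singleton, Int.toNat_of_nonpos (le_of_lt hneg)]]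
      rw [foldl_modify_nil]
      rw [show n.toNat = 0 by omega]
      rfl
    · -- n > 0
      have hr0 : 0 ≤ r := PySem.Int.mod_nonneg s hpos
      have hrlt : r < n := PySem.Int.mod_lt s hpos
      have hsum : q * n + r = s := by
        have := PySem.Int.floordiv_mul_add_mod s n
        rw [← hq, ← hr] at this; linarith
      -- A's side
      rw [PySem.List.pyRepeat_singleton]
      have hlen : (n.toNat : Int) = n := Int.toNat_of_nonneg (le_of_lt hpos)
      have hrn : (r.toNat : Int) = r := Int.toNat_of_nonneg hr0
      have hA := loopA q r.toNat n.toNat []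
      simp only [List.append_nil] at hA
      rw [hlen, hrn] at hA
      rw [hA (by omega)]
      -- B's side
      have hB := loopB q n.toNat r [] hr0 (by omega)
      rw [hlen, show q * n + r = s from hsum] at hB
      rw [hB]
      simp [show n.toNat - r.toNat = (n - r).toNat by omega]
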